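-- pv_equiv track=rewrite | github.com/SirToby-Gore/Game-of-Alaphabet | AlLog.py | looper
-- ===== SOURCE A (Python) =====
-- def looper(arr, i, j):
--     pos = []
--     for l in range(-1, 2):
--         for n in range(-1, 2):
--             y, x = i + l, j + n
--             if 0 <= y < len(arr) and 0 <= x < len(arr[0]):
--                 pos.append(arr[y][x])
--     return pos
-- ===== SOURCE B (Python) =====
-- def looper(arr, i, j):
--     if not arr:
--         return []
--     lo = max(0, j - 1)
--     hi = min(len(arr[0]), j + 2)
--     if lo >= hi:
--         return []
--     pos = []
--     for y in (i - 1, i, i + 1):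
--         if 0 <= y < len(arr):
--             pos.extend(arr[y][lo:hi])
--     return pos
-- ===== Notes on version B (the rewrite author's own statement) =====
-- stated objective: idiomatic
-- what changed: Replaces the 3x3 per-cell bounds-tested double loop with a loop over the three candidate rows that extends the result with one clamped horizontal slice per row (early-exit when the column window is empty).
-- crash fix: On ragged grids where the 3x3 window hits a cell with column index valid for the first row but beyond its own (shorter) row, A raises IndexError; B returns the clamped slice contents instead. — e.g. on looper([[1, 2], [3]], 1, 1): A raises IndexError, B returns [1, 2, 3]
import Mathlib
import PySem

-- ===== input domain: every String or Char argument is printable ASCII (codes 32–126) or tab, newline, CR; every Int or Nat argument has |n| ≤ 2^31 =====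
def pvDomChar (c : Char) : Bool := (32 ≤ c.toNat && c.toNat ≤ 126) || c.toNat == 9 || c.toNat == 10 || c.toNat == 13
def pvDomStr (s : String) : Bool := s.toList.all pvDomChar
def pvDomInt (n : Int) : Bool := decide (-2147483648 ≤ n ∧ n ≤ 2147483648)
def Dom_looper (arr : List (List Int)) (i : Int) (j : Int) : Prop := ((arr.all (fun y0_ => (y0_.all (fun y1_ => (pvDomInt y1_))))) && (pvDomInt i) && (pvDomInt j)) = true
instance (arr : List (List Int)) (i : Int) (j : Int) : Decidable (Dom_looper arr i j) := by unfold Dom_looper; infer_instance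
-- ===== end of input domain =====

-- B replaces the 3x3 per-cell bounds-tested double loop with a loop over the three
-- candidate rows, extending the result with one clamped horizontal slice per row (idiomatic).

-- ===== PORT A =====
-- `arr[0]` is ported as `arr.headD []`: Python only evaluates it when the y-guard
-- already holds (short-circuit `and`), which forces `arr ≠ []`, so the default is unreached.
-- `arr[y][x]` is ported with `pyGetD`; its default is unreached under Pre_looper.
def looper (arr : List (List Int)) (i : Int) (j : Int) : List Int :=
  (PySem.List.pyRange (-1) 2 1).foldl (fun pos l =>
    (PySem.List.pyRange (-1) 2 1).foldl (fun pos n =>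
      if 0 ≤ i + l ∧ i + l < (arr.length : Int) ∧ 0 ≤ j + n ∧ j + n < ((arr.headD []).length : Int) then
        pos ++ [PySem.List.pyGetD (PySem.List.pyGetD arr (i + l) []) (j + n) 0]
      else pos) pos) []

-- ===== PORT B =====
def looper_alt (arr : List (List Int)) (i : Int) (j : Int) : List Int :=
  if arr = [] then []
  else
    let lo := max 0 (j - 1)
    let hi := min ((arr.headD []).length : Int) (j + 2)
    if hi ≤ lo then []
    else
      [i - 1, i, i + 1].foldl (fun pos y =>
        if 0 ≤ y ∧ y < (arr.length : Int) then
          pos ++ PySem.List.slice (PySem.List.pyGetD arr y []) (some lo) (some hi)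
        else pos) []

-- ===== PRECONDITION & SPEC =====
-- Pre_ excludes exactly the ragged grids on which A raises IndexError: a 3x3-window cell
-- whose column index is valid for the first row but not for its own (shorter) row.
def Pre_looper (arr : List (List Int)) (i : Int) (j : Int) : Prop :=
  ∀ y ∈ [i - 1, i, i + 1], ∀ x ∈ [j - 1, j, j + 1],
    0 ≤ y → y < (arr.length : Int) → 0 ≤ x → x < ((arr.headD []).length : Int) →
      x < ((arr.getD y.toNat []).length : Int)
instance (arr : List (List Int)) (i : Int) (j : Int) : Decidable (Pre_looper arr i j) := by
  unfold Pre_looper; infer_instance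

def pvWitness_looper : List (List Int) × Int × Int := ([[1, 2], [3, 4]], 0, 0)

-- On ragged grids where the 3x3 window hits a cell with column index valid for the first
-- row but beyond its own (shorter) row, A raises IndexError; B returns the clamped slice contents.
def Raises_looper (arr : List (List Int)) (i : Int) (j : Int) : Prop :=
  ∃ y ∈ [i - 1, i, i + 1], ∃ x ∈ [j - 1, j, j + 1],
    0 ≤ y ∧ y < (arr.length : Int) ∧ 0 ≤ x ∧ x < ((arr.headD []).length : Int) ∧
      ¬ x < ((arr.getD y.toNat []).length : Int)
instance (arr : List (List Int)) (i : Int) (j : Int) : Decidable (Raises_looper arr i j) := by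
  unfold Raises_looper; infer_instance
def pvRaiseWitness_looper : List (List Int) × Int × Int := ([[1, 2], [3]], 1, 1)
def pvRaiseWitnessOut_looper : List Int := [1, 2, 3]

def Spec_looper (arr : List (List Int)) (i : Int) (j : Int) (out : List Int) : Prop := out = looper_alt arr i j
instance (arr : List (List Int)) (i : Int) (j : Int) (out : List Int) : Decidable (Spec_looper arr i j out) := by unfold Spec_looper; infer_instance

-- ===== CLAIM (what is proved, stated in full; the proofs are below) =====
def Claim_equal_looper : Prop := ∀ (arr : List (List Int)) (i : Int) (j : Int), Dom_looper arr i j → Pre_looper arr i j → Spec_looper arr i j (looper arr i j)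
def Claim_raises_looper : Prop := (∀ (arr : List (List Int)) (i : Int) (j : Int), Dom_looper arr i j → Raises_looper arr i j → ¬ Pre_looper arr i j) ∧ (Dom_looper (pvRaiseWitness_looper.1) (pvRaiseWitness_looper.2.1) (pvRaiseWitness_looper.2.2) ∧ Raises_looper (pvRaiseWitness_looper.1) (pvRaiseWitness_looper.2.1) (pvRaiseWitness_looper.2.2) ∧ looper_alt (pvRaiseWitness_looper.1) (pvRaiseWitness_looper.2.1) (pvRaiseWitness_looper.2.2) = pvRaiseWitnessOut_looper)

-- ===== LEMMAS AND PROOFS =====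

theorem take_drop_getD (r : List Int) (a k : Nat) (h : a + k ≤ r.length) :
    (r.drop a).take k = (List.range k).map (fun t => r.getD (a + t) 0) := by
  apply List.ext_getElem
  · simp; omega
  · intro t h1 h2
    simp only [List.getElem_take, List.getElem_drop, List.getElem_map, List.getElem_range]
    rw [List.getD_eq_getElem _ _ (by simp at h1 ⊢; omega)]

theorem pyGetD_toNat {α : Type} (r : List α) (d : α) (x : Int) (h0 : 0 ≤ x) (h1 : x < (r.length : Int)) :
    PySem.List.pyGetD r x d = r.getD x.toNat d := by
  rw [PySem.List.pyGetD_eq_getElem r d h0 h1, List.getD_eq_getElem]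

theorem row_eq (r : List Int) (j w0 : Int) (hw : 0 ≤ w0)
    (hlo : max 0 (j - 1) < min w0 (j + 2))
    (hr : ∀ x ∈ [j - 1, j, j + 1], 0 ≤ x → x < w0 → x < (r.length : Int)) :
    ((if 0 ≤ j - 1 ∧ j - 1 < w0 then [PySem.List.pyGetD r (j - 1) 0] else []) ++
     ((if 0 ≤ j ∧ j < w0 then [PySem.List.pyGetD r j 0] else []) ++
      (if 0 ≤ j + 1 ∧ j + 1 < w0 then [PySem.List.pyGetD r (j + 1) 0] else [])))
      = PySem.List.slice r (some (max 0 (j - 1))) (some (min w0 (j + 2))) := by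
  have hlen : ∀ x : Int, (x = j - 1 ∨ x = j ∨ x = j + 1) → 0 ≤ x → x < w0 → x < (r.length : Int) := by
    intro x hx; rcases hx with h | h | h <;> subst h <;> exact hr _ (by simp)
  have hH : (min w0 (j + 2)) - 1 < (r.length : Int) :=
    hlen _ (by omega) (by omega) (by omega)
  rw [PySem.List.slice_toNat r (by omega) (by omega),
      take_drop_getD r _ _ (by omega)]
  by_cases c1 : 0 ≤ j - 1 ∧ j - 1 < w0 <;>
  by_cases c2 : 0 ≤ j ∧ j < w0 <;>
  by_cases c3 : 0 ≤ j + 1 ∧ j + 1 < w0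
  · rw [if_pos c1, if_pos c2, if_pos c3]
    rw [show (min w0 (j+2)).toNat - (max 0 (j-1)).toNat = 3 from by omega]
    rw [pyGetD_toNat r 0 (j-1) (by omega) (hlen _ (by omega) (by omega) (by omega))]
    rw [pyGetD_toNat r 0 (j) (by omega) (hlen _ (by omega) (by omega) (by omega))]
    rw [pyGetD_toNat r 0 (j+1) (by omega) (hlen _ (by omega) (by omega) (by omega))]
    simp only [List.range_succ, List.range_zero, List.map_cons, List.map_nil, List.map_append]
    rw [show (max 0 (j-1)).toNat + 0 = (j-1).toNat from by omega]
    rw [show (max 0 (j-1)).toNat + 1 = (j).toNat from by omega]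
    rw [show (max 0 (j-1)).toNat + 2 = (j+1).toNat from by omega]
    simp
  · rw [if_pos c1, if_pos c2, if_neg c3]
    rw [show (min w0 (j+2)).toNat - (max 0 (j-1)).toNat = 2 from by omega]
    rw [pyGetD_toNat r 0 (j-1) (by omega) (hlen _ (by omega) (by omega) (by omega))]
    rw [pyGetD_toNat r 0 (j) (by omega) (hlen _ (by omega) (by omega) (by omega))]
    simp only [List.range_succ, List.range_zero, List.map_cons, List.map_nil, List.map_append]
    rw [show (max 0 (j-1)).toNat + 0 = (j-1).toNat from by omega]
    rw [show (max 0 (j-1)).toNat + 1 = (j).toNat from by omega]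
    simp
  · exact absurd c3 (by omega)
  · rw [if_pos c1, if_neg c2, if_neg c3]
    rw [show (min w0 (j+2)).toNat - (max 0 (j-1)).toNat = 1 from by omega]
    rw [pyGetD_toNat r 0 (j-1) (by omega) (hlen _ (by omega) (by omega) (by omega))]
    simp only [List.range_succ, List.range_zero, List.map_cons, List.map_nil, List.map_append]
    rw [show (max 0 (j-1)).toNat + 0 = (j-1).toNat from by omega]
    simp
  · rw [if_neg c1, if_pos c2, if_pos c3]
    rw [show (min w0 (j+2)).toNat - (max 0 (j-1)).toNat = 2 from by omega]
    rw [pyGetD_toNat r 0 (j) (by omega) (hlen _ (by omega) (by omega) (by omega))]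
    rw [pyGetD_toNat r 0 (j+1) (by omega) (hlen _ (by omega) (by omega) (by omega))]
    simp only [List.range_succ, List.range_zero, List.map_cons, List.map_nil, List.map_append]
    rw [show (max 0 (j-1)).toNat + 0 = (j).toNat from by omega]
    rw [show (max 0 (j-1)).toNat + 1 = (j+1).toNat from by omega]
    simp
  · rw [if_neg c1, if_pos c2, if_neg c3]
    rw [show (min w0 (j+2)).toNat - (max 0 (j-1)).toNat = 1 from by omega]
    rw [pyGetD_toNat r 0 (j) (by omega) (hlen _ (by omega) (by omega) (by omega))]
    simp only [List.range_succ, List.range_zero, List.map_cons, List.map_nil, List.map_append]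
    rw [show (max 0 (j-1)).toNat + 0 = (j).toNat from by omega]
    simp
  · rw [if_neg c1, if_neg c2, if_pos c3]
    rw [show (min w0 (j+2)).toNat - (max 0 (j-1)).toNat = 1 from by omega]
    rw [pyGetD_toNat r 0 (j+1) (by omega) (hlen _ (by omega) (by omega) (by omega))]
    simp only [List.range_succ, List.range_zero, List.map_cons, List.map_nil, List.map_append]
    rw [show (max 0 (j-1)).toNat + 0 = (j+1).toNat from by omega]
    simp
  · exact absurd hlo (by omega)


theorem foldl_ite_append {α β : Type} (P : α → Prop) [DecidablePred P] (f : α → List β)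
    (l : List α) (acc : List β) :
    l.foldl (fun acc x => if P x then acc ++ f x else acc) acc
      = acc ++ l.flatMap (fun x => if P x then f x else []) := by
  induction l generalizing acc with
  | nil => simp
  | cons a l ih => by_cases h : P a <;> simp [h, ih]


theorem rowfull (arr : List (List Int)) (j y : Int)
    (hb : ¬ min ((arr.headD []).length : Int) (j + 2) ≤ max 0 (j - 1))
    (hrow : ∀ x ∈ [j - 1, j, j + 1], 0 ≤ y → y < (arr.length : Int) → 0 ≤ x →
      x < ((arr.headD []).length : Int) → x < ((arr.getD y.toNat []).length : Int)) :
    ((if 0 ≤ y ∧ y < (arr.length : Int) ∧ 0 ≤ j - 1 ∧ j - 1 < ((arr.headD []).length : Int) then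
        [PySem.List.pyGetD (PySem.List.pyGetD arr y []) (j - 1) 0] else []) ++
     ((if 0 ≤ y ∧ y < (arr.length : Int) ∧ 0 ≤ j ∧ j < ((arr.headD []).length : Int) then
        [PySem.List.pyGetD (PySem.List.pyGetD arr y []) j 0] else []) ++
      ((if 0 ≤ y ∧ y < (arr.length : Int) ∧ 0 ≤ j + 1 ∧ j + 1 < ((arr.headD []).length : Int) then
        [PySem.List.pyGetD (PySem.List.pyGetD arr y []) (j + 1) 0] else []) ++ [])))
    = (if 0 ≤ y ∧ y < (arr.length : Int) then
        PySem.List.slice (PySem.List.pyGetD arr y [])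
          (some (max 0 (j - 1))) (some (min ((arr.headD []).length : Int) (j + 2)))
      else []) := by
  by_cases hy : 0 ≤ y ∧ y < (arr.length : Int)
  · rw [if_pos hy]
    rw [pyGetD_toNat arr [] y hy.1 hy.2]
    simp only [hy.1, hy.2, true_and, List.append_nil]
    exact row_eq _ j _ (Int.natCast_nonneg _) (by omega)
      (fun x hx h0 h1 => hrow x hx hy.1 hy.2 h0 h1)
  · rw [if_neg hy, if_neg (fun h => hy ⟨h.1, h.2.1⟩), if_neg (fun h => hy ⟨h.1, h.2.1⟩),
        if_neg (fun h => hy ⟨h.1, h.2.1⟩)]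
    rfl

theorem looper_eq_alt (arr : List (List Int)) (i j : Int) (hp : Pre_looper arr i j) :
    looper arr i j = looper_alt arr i j := by
  have hrange : PySem.List.pyRange (-1) 2 1 = [-1, 0, 1] := by decide
  unfold looper looper_alt
  rw [hrange]
  simp only [foldl_ite_append, PySem.List.foldl_append_eq_flatMap, List.nil_append]
  by_cases ha : arr = []
  · subst ha
    rw [if_pos rfl, List.flatMap_eq_nil_iff]
    intro l hl
    rw [List.flatMap_eq_nil_iff]
    intro n hn
    simp only [List.length_nil, Nat.cast_zero]
    rw [if_neg (by omega)]
  · rw [if_neg ha]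
    by_cases hb : min ((arr.headD []).length : Int) (j + 2) ≤ max 0 (j - 1)
    · rw [if_pos hb, List.flatMap_eq_nil_iff]
      intro l hl
      rw [List.flatMap_eq_nil_iff]
      intro n hn
      rw [if_neg]
      intro hc
      simp only [List.mem_cons, List.not_mem_nil] at hl hn
      rcases hl with h|h|h|h <;> rcases hn with g|g|g|g <;> omega
    · rw [if_neg hb]
      simp only [List.flatMap_cons, List.flatMap_nil]
      rw [show i + (-1) = i - 1 from by ring, show i + 0 = i from by ring,
          show j + (-1) = j - 1 from by ring, show j + 0 = j from by ring]
      rw [rowfull arr j (i - 1) hb (fun x hx => hp (i - 1) (by simp) x hx),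
          rowfull arr j i hb (fun x hx => hp i (by simp) x hx),
          rowfull arr j (i + 1) hb (fun x hx => hp (i + 1) (by simp) x hx)]

-- ===== VERDICT (by name: the statement is the Claim_ definition above) =====
theorem looper_spec : Claim_equal_looper := by
  intro arr i j _ hp
  unfold Spec_looper
  exact looper_eq_alt arr i j hp

@[simp] theorem looper_raises : Claim_raises_looper := by
  unfold Claim_raises_looper
  refine ⟨?_, by decide⟩
  intro arr i j _ hR hP
  obtain ⟨y, hy, x, hx, h1, h2, h3, h4, h5⟩ := hR
  exact h5 (hP y hy x hx h1 h2 h3 h4)
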